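-- pv_equiv track=rewrite | github.com/akha-security/akha-xss | akha/modules/xss/xss_engine.py | _classify_encoding_profile
-- ===== SOURCE A (Python) =====
-- from typing import List, Dict, Optional
--
-- def _classify_encoding_profile(probe_result: Dict) -> str:
--     """Compress character-encoding outcomes into a stable profile label."""
--     chars = probe_result.get('chars', {}) or {}
--     if not chars:
--         return 'unknown'
--     statuses = list(chars.values())
--     if statuses and all(s == 'raw' for s in statuses):
--         return 'raw'
--     if statuses and all(s == 'encoded' for s in statuses):
--         return 'encoded'
--     if statuses and all(s == 'removed' for s in statuses):
--         return 'stripped'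
--     if 'encoded' in statuses and 'raw' in statuses:
--         return 'mixed'
--     return 'partial'
-- ===== SOURCE B (Python) =====
-- def _classify_encoding_profile(probe_result):
--     """Compress character-encoding outcomes into a stable profile label."""
--     chars = probe_result.get('chars', {}) or {}
--     if not chars:
--         return 'unknown'
--     has_raw = has_encoded = has_removed = has_other = False
--     for s in chars.values():
--         if s == 'raw':
--             has_raw = True
--         elif s == 'encoded':
--             has_encoded = True
--         elif s == 'removed':
--             has_removed = True
--         else:
--             has_other = True
--     if has_raw and not (has_encoded or has_removed or has_other):
--         return 'raw'
--     if has_encoded and not (has_raw or has_removed or has_other):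
--         return 'encoded'
--     if has_removed and not (has_raw or has_encoded or has_other):
--         return 'stripped'
--     if has_encoded and has_raw:
--         return 'mixed'
--     return 'partial'
-- ===== Notes on version B (the rewrite author's own statement) =====
-- stated objective: alternative
-- what changed: B replaces A's repeated all()/in scans over the status list by a single pass that accumulates four boolean flags (raw/encoded/removed/other seen) and then decides the label purely from the flags.
import Mathlib
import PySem

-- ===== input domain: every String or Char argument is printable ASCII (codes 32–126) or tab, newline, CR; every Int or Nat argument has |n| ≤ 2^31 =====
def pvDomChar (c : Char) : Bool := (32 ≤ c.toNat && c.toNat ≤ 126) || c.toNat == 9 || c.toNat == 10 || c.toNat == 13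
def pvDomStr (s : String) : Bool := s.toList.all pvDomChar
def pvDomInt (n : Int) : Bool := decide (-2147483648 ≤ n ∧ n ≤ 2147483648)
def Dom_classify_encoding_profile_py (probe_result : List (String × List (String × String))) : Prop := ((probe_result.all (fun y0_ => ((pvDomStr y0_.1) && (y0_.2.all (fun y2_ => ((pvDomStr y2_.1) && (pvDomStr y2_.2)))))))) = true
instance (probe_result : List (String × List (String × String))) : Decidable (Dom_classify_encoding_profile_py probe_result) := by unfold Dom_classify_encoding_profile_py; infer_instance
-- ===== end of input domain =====

-- B makes a single pass accumulating four seen-flags (raw/encoded/removed/other) and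
-- decides the label from the flags, instead of A's repeated all()/in scans (objective: alternative).


-- ===== PORT A =====
def classify_encoding_profile_py (probe_result : List (String × List (String × String))) : String :=
  -- chars = probe_result.get('chars', {}) or {}  ('or {}' is the identity on a dict value)
  let chars := (PySem.Dict.mk probe_result).getD "chars" []
  if chars.isEmpty then "unknown"
  else
    let statuses := chars.map Prod.snd
    if !statuses.isEmpty && statuses.all (· == "raw") then "raw"
    else if !statuses.isEmpty && statuses.all (· == "encoded") then "encoded"
    else if !statuses.isEmpty && statuses.all (· == "removed") then "stripped"
    else if statuses.contains "encoded" && statuses.contains "raw" then "mixed"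
    else "partial"

-- ===== PORT B =====
-- one step of B's loop over the status values: update the four seen-flags
def pvFlagStep (acc : Bool × Bool × Bool × Bool) (s : String) : Bool × Bool × Bool × Bool :=
  if s == "raw" then (true, acc.2.1, acc.2.2.1, acc.2.2.2)
  else if s == "encoded" then (acc.1, true, acc.2.2.1, acc.2.2.2)
  else if s == "removed" then (acc.1, acc.2.1, true, acc.2.2.2)
  else (acc.1, acc.2.1, acc.2.2.1, true)

def classify_encoding_profile_py_alt (probe_result : List (String × List (String × String))) : String :=
  let chars := (PySem.Dict.mk probe_result).getD "chars" []
  if chars.isEmpty then "unknown"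
  else
    let fl := (chars.map Prod.snd).foldl pvFlagStep (false, false, false, false)
    let hasRaw := fl.1
    let hasEnc := fl.2.1
    let hasRem := fl.2.2.1
    let hasOth := fl.2.2.2
    if hasRaw && !(hasEnc || hasRem || hasOth) then "raw"
    else if hasEnc && !(hasRaw || hasRem || hasOth) then "encoded"
    else if hasRem && !(hasRaw || hasEnc || hasOth) then "stripped"
    else if hasEnc && hasRaw then "mixed"
    else "partial"

-- ===== PRECONDITION & SPEC =====
def Spec_classify_encoding_profile_py (probe_result : List (String × List (String × String))) (out : String) : Prop := out = classify_encoding_profile_py_alt probe_result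
instance (probe_result : List (String × List (String × String))) (out : String) : Decidable (Spec_classify_encoding_profile_py probe_result out) := by unfold Spec_classify_encoding_profile_py; infer_instance

-- ===== CLAIM (what is proved, stated in full; the proofs are below) =====
def Claim_equal_classify_encoding_profile_py : Prop := ∀ (probe_result : List (String × List (String × String))), Dom_classify_encoding_profile_py probe_result → Spec_classify_encoding_profile_py probe_result (classify_encoding_profile_py probe_result)

-- ===== LEMMAS AND PROOFS =====

-- predicate for "none of the three known statuses"
def pvOth (s : String) : Bool := !(s == "raw") && !(s == "encoded") && !(s == "removed")

-- the fold over pvFlagStep computes the four existence flags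
theorem foldl_flagStep (xs : List String) (r e m o : Bool) :
    xs.foldl pvFlagStep (r, e, m, o) =
      (r || xs.any (· == "raw"), e || xs.any (· == "encoded"),
       m || xs.any (· == "removed"), o || xs.any pvOth) := by
  induction xs generalizing r e m o with
  | nil => simp
  | cons s t ih =>
    simp only [List.foldl_cons, List.any_cons, pvFlagStep]
    by_cases h1 : s = "raw"
    · subst h1; rw [ih]; simp [pvOth]
    · by_cases h2 : s = "encoded"
      · subst h2; rw [if_neg (by simp), if_pos (by simp), ih]; simp [pvOth]
      · by_cases h3 : s = "removed"
        · subst h3; rw [if_neg (by simp), if_neg (by simp), if_pos (by simp), ih]; simp [pvOth]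
        · have e1 : (s == "raw") = false := by simp [h1]
          have e2 : (s == "encoded") = false := by simp [h2]
          have e3 : (s == "removed") = false := by simp [h3]
          rw [if_neg (by simp [h1]), if_neg (by simp [h2]), if_neg (by simp [h3]), ih]
          simp [pvOth, e1, e2, e3]

theorem any_or_split (xs : List String) (p q : String → Bool) :
    xs.any (fun s => p s || q s) = (xs.any p || xs.any q) := by
  induction xs with
  | nil => simp
  | cons s t ih =>
    simp [List.any_cons, ih, Bool.or_assoc, Bool.or_left_comm]

theorem all_eq_not_any (xs : List String) (p : String → Bool) :
    xs.all p = !xs.any (fun s => !(p s)) := by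
  induction xs with
  | nil => simp
  | cons s t ih => simp [List.all_cons, List.any_cons, ih]

theorem all_eq_any_all (xs : List String) (p : String → Bool) (h : xs ≠ []) :
    xs.all p = (xs.any p && xs.all p) := by
  by_cases hall : xs.all p = true
  · obtain ⟨y, hy⟩ := List.exists_mem_of_ne_nil xs h
    have : xs.any p = true := by
      rw [List.any_eq_true]
      exact ⟨y, hy, by simpa using (List.all_eq_true.mp hall) y hy⟩
    simp [hall, this]
  · simp [Bool.eq_false_iff.mpr hall]

theorem split_raw (s : String) :
    (!(s == "raw")) = (((s == "encoded") || (s == "removed")) || pvOth s) := by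
  unfold pvOth
  by_cases h1 : s = "raw"
  · subst h1; simp
  · by_cases h2 : s = "encoded"
    · subst h2; simp
    · by_cases h3 : s = "removed"
      · subst h3; simp
      · have e1 : (s == "raw") = false := by simp [h1]
        have e2 : (s == "encoded") = false := by simp [h2]
        have e3 : (s == "removed") = false := by simp [h3]
        simp [e1, e2, e3]

theorem split_enc (s : String) :
    (!(s == "encoded")) = (((s == "raw") || (s == "removed")) || pvOth s) := by
  unfold pvOth
  by_cases h1 : s = "raw"
  · subst h1; simp
  · by_cases h2 : s = "encoded"
    · subst h2; simp
    · by_cases h3 : s = "removed"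
      · subst h3; simp
      · have e1 : (s == "raw") = false := by simp [h1]
        have e2 : (s == "encoded") = false := by simp [h2]
        have e3 : (s == "removed") = false := by simp [h3]
        simp [e1, e2, e3]

theorem split_rem (s : String) :
    (!(s == "removed")) = (((s == "raw") || (s == "encoded")) || pvOth s) := by
  unfold pvOth
  by_cases h1 : s = "raw"
  · subst h1; simp
  · by_cases h2 : s = "encoded"
    · subst h2; simp
    · by_cases h3 : s = "removed"
      · subst h3; simp
      · have e1 : (s == "raw") = false := by simp [h1]
        have e2 : (s == "encoded") = false := by simp [h2]
        have e3 : (s == "removed") = false := by simp [h3]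
        simp [e1, e2, e3]

theorem all_raw_flags (xs : List String) (h : xs ≠ []) :
    xs.all (· == "raw") =
      (xs.any (· == "raw") && !((xs.any (· == "encoded") || xs.any (· == "removed")) || xs.any pvOth)) := by
  have key : xs.all (· == "raw") =
      !((xs.any (· == "encoded") || xs.any (· == "removed")) || xs.any pvOth) := by
    rw [all_eq_not_any]
    congr 1
    calc xs.any (fun s => !(s == "raw"))
        = xs.any (fun s => (((s == "encoded") || (s == "removed")) || pvOth s)) := by
          simp only [split_raw]
      _ = (xs.any (fun s => (s == "encoded") || (s == "removed")) || xs.any pvOth) := any_or_split xs _ _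
      _ = ((xs.any (· == "encoded") || xs.any (· == "removed")) || xs.any pvOth) := by rw [any_or_split]
  rw [← key]; exact all_eq_any_all xs _ h

theorem all_enc_flags (xs : List String) (h : xs ≠ []) :
    xs.all (· == "encoded") =
      (xs.any (· == "encoded") && !((xs.any (· == "raw") || xs.any (· == "removed")) || xs.any pvOth)) := by
  have key : xs.all (· == "encoded") =
      !((xs.any (· == "raw") || xs.any (· == "removed")) || xs.any pvOth) := by
    rw [all_eq_not_any]
    congr 1
    calc xs.any (fun s => !(s == "encoded"))
        = xs.any (fun s => (((s == "raw") || (s == "removed")) || pvOth s)) := by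
          simp only [split_enc]
      _ = (xs.any (fun s => (s == "raw") || (s == "removed")) || xs.any pvOth) := any_or_split xs _ _
      _ = ((xs.any (· == "raw") || xs.any (· == "removed")) || xs.any pvOth) := by rw [any_or_split]
  rw [← key]; exact all_eq_any_all xs _ h

theorem all_rem_flags (xs : List String) (h : xs ≠ []) :
    xs.all (· == "removed") =
      (xs.any (· == "removed") && !((xs.any (· == "raw") || xs.any (· == "encoded")) || xs.any pvOth)) := by
  have key : xs.all (· == "removed") =
      !((xs.any (· == "raw") || xs.any (· == "encoded")) || xs.any pvOth) := by
    rw [all_eq_not_any]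
    congr 1
    calc xs.any (fun s => !(s == "removed"))
        = xs.any (fun s => (((s == "raw") || (s == "encoded")) || pvOth s)) := by
          simp only [split_rem]
      _ = (xs.any (fun s => (s == "raw") || (s == "encoded")) || xs.any pvOth) := any_or_split xs _ _
      _ = ((xs.any (· == "raw") || xs.any (· == "encoded")) || xs.any pvOth) := by rw [any_or_split]
  rw [← key]; exact all_eq_any_all xs _ h

theorem contains_eq_any (xs : List String) (a : String) :
    xs.contains a = xs.any (· == a) := by
  rw [Bool.eq_iff_iff]
  simp [List.any_eq_true]

-- ===== VERDICT (by name: the statement is the Claim_ definition above) =====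
theorem classify_encoding_profile_py_spec : Claim_equal_classify_encoding_profile_py := by
  intro pr _
  unfold Spec_classify_encoding_profile_py classify_encoding_profile_py classify_encoding_profile_py_alt
  set chars := (PySem.Dict.mk pr).getD "chars" [] with hch
  by_cases hE : chars.isEmpty
  · simp [hE]
  · have hne : chars.map Prod.snd ≠ [] := by
      simp only [ne_eq, List.map_eq_nil_iff]
      intro h0; rw [h0] at hE; exact hE rfl
    have hne' : (chars.map Prod.snd).isEmpty = false := by
      rw [List.isEmpty_eq_false_iff]; exact hne
    simp only [hE, if_false, Bool.false_eq_true, foldl_flagStep, Bool.false_or]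
    rw [all_raw_flags _ hne, all_enc_flags _ hne, all_rem_flags _ hne,
        contains_eq_any, contains_eq_any]
    simp only [hne', Bool.not_false, Bool.true_and]
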